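-- pv_equiv track=rewrite | github.com/Publilab/Linkedin_Searching-Job | backend/app/services/profile_ai_service.py | _infer_industries
-- ===== SOURCE A (Python) =====
-- from typing import Any
--
-- def _clean_list(values: Any) -> list[str]:
--     if not isinstance(values, list):
--         return []
--     out: list[str] = []
--     seen: set[str] = set()
--     for value in values:
--         if not isinstance(value, str):
--             continue
--         cleaned = " ".join(value.split())
--         if not cleaned:
--             continue
--         key = cleaned.lower()
--         if key in seen:
--             continue
--         seen.add(key)
--         out.append(cleaned)
--     return out
--
-- def _infer_industries(summary: dict[str, Any]) -> list[str]:
--     corpus = " ".join(summary.get("experience", []) + summary.get("education", [])).lower()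
--     mapping = {
--         "finance": "Finance",
--         "bank": "Finance",
--         "health": "Healthcare",
--         "hospital": "Healthcare",
--         "retail": "Retail",
--         "marketing": "Marketing",
--         "ecommerce": "E-commerce",
--         "software": "Software",
--         "data": "Data & Analytics",
--         "logistics": "Logistics",
--         "public": "Public Sector",
--         "municip": "Public Sector",
--         "gobierno": "Public Sector",
--         "ministerio": "Public Sector",
--         "estado": "Public Sector",
--         "rrhh": "Human Resources",
--         "recursos humanos": "Human Resources",
--         "human resources": "Human Resources",
--         "talento humano": "Human Resources",
--         "academ": "Education",
--         "docenc": "Education",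
--         "universidad": "Education",
--         "educacion": "Education",
--         "educación": "Education",
--     }
--     out: list[str] = []
--     for token, label in mapping.items():
--         if token in corpus:
--             out.append(label)
--     return _clean_list(out)
-- ===== SOURCE B (Python) =====
-- def _infer_industries(summary):
--     corpus = " ".join(summary.get("experience", []) + summary.get("education", [])).lower()
--     groups = {
--         "Finance": ["finance", "bank"],
--         "Healthcare": ["health", "hospital"],
--         "Retail": ["retail"],
--         "Marketing": ["marketing"],
--         "E-commerce": ["ecommerce"],
--         "Software": ["software"],
--         "Data & Analytics": ["data"],
--         "Logistics": ["logistics"],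
--         "Public Sector": ["public", "municip", "gobierno", "ministerio", "estado"],
--         "Human Resources": ["rrhh", "recursos humanos", "human resources", "talento humano"],
--         "Education": ["academ", "docenc", "universidad", "educacion", "educaci\u00f3n"],
--     }
--     return [label for label, tokens in groups.items()
--             if any(tok in corpus for tok in tokens)]
-- ===== Notes on version B (the rewrite author's own statement) =====
-- stated objective: idiomatic
-- what changed: Replaces A's flat token-to-label scan that appends a label per matching token and then deduplicates with a whitespace-normalising _clean_list pass by a hardcoded inverted table (industry -> keyword list, labels in A's first-occurrence order) and a single comprehension emitting each label at most once via any(tok in corpus).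
import Mathlib
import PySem

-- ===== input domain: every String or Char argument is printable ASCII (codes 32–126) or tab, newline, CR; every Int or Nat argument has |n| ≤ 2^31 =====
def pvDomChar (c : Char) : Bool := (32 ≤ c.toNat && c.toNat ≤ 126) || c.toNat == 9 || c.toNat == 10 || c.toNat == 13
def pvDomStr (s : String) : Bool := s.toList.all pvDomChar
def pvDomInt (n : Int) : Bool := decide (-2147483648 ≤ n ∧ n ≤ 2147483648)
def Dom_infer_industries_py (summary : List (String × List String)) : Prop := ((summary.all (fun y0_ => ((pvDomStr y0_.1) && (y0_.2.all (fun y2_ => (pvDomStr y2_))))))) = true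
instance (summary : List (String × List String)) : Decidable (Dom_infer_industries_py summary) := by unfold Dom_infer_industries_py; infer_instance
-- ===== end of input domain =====

-- B replaces A's flat token→label scan plus the _clean_list dedup pass by a hardcoded inverted
-- table (industry → keyword list) and one comprehension; idiomatic, same output.

-- ===== PORT A =====

-- the literal `mapping` dict of A, as its items list (insertion order)
def mappingA : List (String × String) :=
  [("finance", "Finance"), ("bank", "Finance"), ("health", "Healthcare"),
   ("hospital", "Healthcare"), ("retail", "Retail"), ("marketing", "Marketing"),
   ("ecommerce", "E-commerce"), ("software", "Software"), ("data", "Data & Analytics"),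
   ("logistics", "Logistics"), ("public", "Public Sector"), ("municip", "Public Sector"),
   ("gobierno", "Public Sector"), ("ministerio", "Public Sector"), ("estado", "Public Sector"),
   ("rrhh", "Human Resources"), ("recursos humanos", "Human Resources"),
   ("human resources", "Human Resources"), ("talento humano", "Human Resources"),
   ("academ", "Education"), ("docenc", "Education"), ("universidad", "Education"),
   ("educacion", "Education"), ("educación", "Education")]

-- one step of _clean_list's loop (the isinstance check is vacuous: every value is a String here)
def cleanStep (st : List String × PySem.Set String) (value : String) : List String × PySem.Set String :=
  let cleaned := PySem.Str.join " " (PySem.Str.split₀ value)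
  if cleaned = "" then st
  else
    let key := PySem.Str.lower cleaned
    if PySem.Set.contains st.2 key then st
    else (st.1 ++ [cleaned], PySem.Set.add st.2 key)

def clean_list (values : List String) : List String :=
  (values.foldl cleanStep ([], PySem.Set.empty)).1

def infer_industries_py (summary : List (String × List String)) : List String :=
  let corpus := PySem.Str.lower (PySem.Str.join " "
    ((PySem.Dict.mk summary).getD "experience" [] ++ (PySem.Dict.mk summary).getD "education" []))
  let out := mappingA.foldl
    (fun acc tl => if PySem.Str.isIn tl.1 corpus then acc ++ [tl.2] else acc) []
  clean_list out

-- ===== PORT B =====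

-- B's literal `groups` dict: industry → keyword list, as its items list (insertion order)
def groupsB : List (String × List String) :=
  [("Finance", ["finance", "bank"]), ("Healthcare", ["health", "hospital"]),
   ("Retail", ["retail"]), ("Marketing", ["marketing"]), ("E-commerce", ["ecommerce"]),
   ("Software", ["software"]), ("Data & Analytics", ["data"]), ("Logistics", ["logistics"]),
   ("Public Sector", ["public", "municip", "gobierno", "ministerio", "estado"]),
   ("Human Resources", ["rrhh", "recursos humanos", "human resources", "talento humano"]),
   ("Education", ["academ", "docenc", "universidad", "educacion", "educación"])]

def infer_industries_py_alt (summary : List (String × List String)) : List String :=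
  let corpus := PySem.Str.lower (PySem.Str.join " "
    ((PySem.Dict.mk summary).getD "experience" [] ++ (PySem.Dict.mk summary).getD "education" []))
  -- [label for label, tokens in groups.items() if any(tok in corpus for tok in tokens)]
  (groupsB.filter (fun lt => lt.2.any (fun tok => PySem.Str.isIn tok corpus))).map Prod.fst

-- ===== PRECONDITION & SPEC =====
def Spec_infer_industries_py (summary : List (String × List String)) (out : List String) : Prop := out = infer_industries_py_alt summary
instance (summary : List (String × List String)) (out : List String) : Decidable (Spec_infer_industries_py summary out) := by unfold Spec_infer_industries_py; infer_instance

-- ===== CLAIM (what is proved, stated in full; the proofs are below) =====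
def Claim_equal_infer_industries_py : Prop := ∀ (summary : List (String × List String)), Dom_infer_industries_py summary → Spec_infer_industries_py summary (infer_industries_py summary)

-- ===== LEMMAS AND PROOFS =====

-- A's flat mapping is exactly B's grouped table flattened back out
theorem mappingA_blocks :
    mappingA = groupsB.flatMap (fun g => g.2.map (fun t => (t, g.1))) := by decide

theorem filter_map_flatMap (gs : List (String × List String)) (p : String → Bool) :
    ((gs.flatMap (fun g => g.2.map (fun t => (t, g.1)))).filter (fun tl => p tl.1)).map Prod.snd
      = gs.flatMap (fun g => (g.2.filter p).map (fun _ => g.1)) := by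
  induction gs with
  | nil => simp
  | cons g gs ih =>
    simp [List.flatMap_cons, List.filter_append, List.map_append, List.filter_map,
      List.map_map, ih, Function.comp_def]

-- once the key is seen, the rest of a block of copies of l is skipped
theorem foldl_cleanStep_skip (l : String) (n : Nat) (acc : List String) (seen : PySem.Set String)
    (hcl : PySem.Str.join " " (PySem.Str.split₀ l) = l) (hne : l ≠ "")
    (hmem : (PySem.Str.lower l) ∈ seen) :
    (List.replicate n l).foldl cleanStep (acc, seen) = (acc, seen) := by
  induction n with
  | zero => simp
  | succ n ih =>
    rw [List.replicate_succ, List.foldl_cons]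
    have : cleanStep (acc, seen) l = (acc, seen) := by
      simp [cleanStep, hcl, hne, hmem]
    rw [this, ih]

theorem foldl_cleanStep_block (l : String) (n : Nat) (acc : List String) (seen : PySem.Set String)
    (hcl : PySem.Str.join " " (PySem.Str.split₀ l) = l) (hne : l ≠ "")
    (hfresh : (PySem.Str.lower l) ∉ seen) :
    (List.replicate n l).foldl cleanStep (acc, seen)
      = if n = 0 then (acc, seen) else (acc ++ [l], PySem.Set.add seen (PySem.Str.lower l)) := by
  cases n with
  | zero => simp
  | succ n =>
    rw [List.replicate_succ, List.foldl_cons]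
    have h1 : cleanStep (acc, seen) l = (acc ++ [l], PySem.Set.add seen (PySem.Str.lower l)) := by
      simp [cleanStep, hcl, hne, hfresh]
    rw [h1, foldl_cleanStep_skip l n _ _ hcl hne
      ((PySem.Set.mem_add seen (PySem.Str.lower l) (PySem.Str.lower l)).mpr (Or.inr rfl))]
    simp

-- main invariant: _clean_list over the per-group blocks of matching labels
theorem cleanFold_blocks (q : String → Bool) (gs : List (String × List String))
    (acc : List String) (seen : PySem.Set String)
    (hcl : ∀ g ∈ gs, PySem.Str.join " " (PySem.Str.split₀ g.1) = g.1 ∧ g.1 ≠ "")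
    (hfresh : ∀ g ∈ gs, (PySem.Str.lower g.1) ∉ seen)
    (hnd : (gs.map (fun g => PySem.Str.lower g.1)).Nodup) :
    ((gs.flatMap (fun g => (g.2.filter q).map (fun _ => g.1))).foldl cleanStep (acc, seen)).1
      = acc ++ (gs.filter (fun g => g.2.any q)).map Prod.fst := by
  induction gs generalizing acc seen with
  | nil => simp
  | cons g gs ih =>
    obtain ⟨hcl1, hne1⟩ := hcl g (List.mem_cons_self ..)
    have hrep : (g.2.filter q).map (fun _ => g.1)
        = List.replicate (g.2.filter q).length g.1 := List.map_const'
    rw [List.flatMap_cons, List.foldl_append, hrep,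
      foldl_cleanStep_block g.1 _ acc seen hcl1 hne1 (hfresh g (List.mem_cons_self ..))]
    have hanyiff : g.2.any q = true ↔ (g.2.filter q).length ≠ 0 := by
      simp [List.any_eq_true, List.length_eq_zero_iff, List.filter_eq_nil_iff]
    rw [List.map_cons, List.nodup_cons] at hnd
    by_cases hz : (g.2.filter q).length = 0
    · have hany : g.2.any q = false := by
        cases h : g.2.any q with
        | false => rfl
        | true => exact absurd (hanyiff.mp h) (by simp [hz])
      rw [if_pos hz, List.filter_cons_of_neg (by simp [hany])]
      exact ih acc seen (fun x hx => hcl x (List.mem_cons_of_mem _ hx))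
        (fun x hx => hfresh x (List.mem_cons_of_mem _ hx)) (by exact hnd.2)
    · have hany : g.2.any q = true := hanyiff.mpr hz
      rw [if_neg hz, List.filter_cons_of_pos (by simp [hany]), List.map_cons]
      rw [ih (acc ++ [g.1]) (PySem.Set.add seen (PySem.Str.lower g.1))
        (fun x hx => hcl x (List.mem_cons_of_mem _ hx))
        (fun x hx => by
          intro hmem
          rcases (PySem.Set.mem_add seen (PySem.Str.lower g.1) (PySem.Str.lower x.1)).mp hmem with h | h
          · exact hfresh x (List.mem_cons_of_mem _ hx) h
          · exact hnd.1 (h ▸ List.mem_map_of_mem hx))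
        hnd.2]
      simp

theorem groupsB_clean :
    ∀ g ∈ groupsB, PySem.Str.join " " (PySem.Str.split₀ g.1) = g.1 ∧ g.1 ≠ "" := by decide

theorem groupsB_nodup : (groupsB.map (fun g => PySem.Str.lower g.1)).Nodup := by decide

theorem key_eq (c : String) :
    clean_list (mappingA.foldl
        (fun acc tl => if PySem.Str.isIn tl.1 c then acc ++ [tl.2] else acc) [])
      = (groupsB.filter (fun lt => lt.2.any (fun tok => PySem.Str.isIn tok c))).map Prod.fst := by
  rw [PySem.List.foldl_append_if (fun tl => PySem.Str.isIn tl.1 c) Prod.snd, List.nil_append]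
  rw [mappingA_blocks, filter_map_flatMap groupsB (fun t => PySem.Str.isIn t c)]
  unfold clean_list
  rw [cleanFold_blocks (fun t => PySem.Str.isIn t c) groupsB [] PySem.Set.empty
    groupsB_clean (by intro g _; simp [PySem.Set.empty]) groupsB_nodup, List.nil_append]

-- ===== VERDICT (by name: the statement is the Claim_ definition above) =====
theorem infer_industries_py_spec : Claim_equal_infer_industries_py := by
  intro summary _
  unfold Spec_infer_industries_py infer_industries_py infer_industries_py_alt
  exact key_eq _
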